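-- pv_equiv track=rewrite | github.com/anastasiapanda/rabbit | rabbit/zoho/print_stickers_1/__init__.py | get_query_texts
-- ===== SOURCE A (Python) =====
-- def get_query_texts(deals):
--     result = []
--     select_query = '''
--     select id, DailyID, goods_count, pickerText, cardText
--     from Deals
--     where '''
--     where_ids = ''
--     is_first = True
--     i = 0
--     for d in deals:
--         i += 1
--         if(not is_first):
--             where_ids = '(' + where_ids + ' or '
--         where_ids += '(id=' + d + ')'
--         if(is_first):
--             is_first = False
--         else:
--             where_ids += ')'
--         if(i == 24):
--             is_first = True
--             i = 0
--             result.append(select_query + where_ids + '\nlimit 200')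
--             where_ids = ''
--     if(i != 0):
--         result.append(select_query + where_ids + '\nlimit 200')
--     return result
-- ===== SOURCE B (Python) =====
-- SELECT_QUERY = '''
--     select id, DailyID, goods_count, pickerText, cardText
--     from Deals
--     where '''
--
-- def get_query_texts(deals):
--     result = []
--     i = 0
--     while i < len(deals):
--         acc = '(id=' + deals[i] + ')'
--         for d in deals[i + 1:i + 24]:
--             acc = '(' + acc + ' or (id=' + d + ')' + ')'
--         result.append(SELECT_QUERY + acc + '\nlimit 200')
--         i += 24
--     return result
-- ===== Notes on version B (the rewrite author's own statement) =====
-- stated objective: simpler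
-- what changed: B replaces A's single loop threading a where_ids buffer, an is_first flag and a counter with mid-loop flushes by a while-loop that jumps 24 ids at a time, slicing each batch's tail and folding it into the nested where-clause from a batch-head base case.
import Mathlib
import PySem

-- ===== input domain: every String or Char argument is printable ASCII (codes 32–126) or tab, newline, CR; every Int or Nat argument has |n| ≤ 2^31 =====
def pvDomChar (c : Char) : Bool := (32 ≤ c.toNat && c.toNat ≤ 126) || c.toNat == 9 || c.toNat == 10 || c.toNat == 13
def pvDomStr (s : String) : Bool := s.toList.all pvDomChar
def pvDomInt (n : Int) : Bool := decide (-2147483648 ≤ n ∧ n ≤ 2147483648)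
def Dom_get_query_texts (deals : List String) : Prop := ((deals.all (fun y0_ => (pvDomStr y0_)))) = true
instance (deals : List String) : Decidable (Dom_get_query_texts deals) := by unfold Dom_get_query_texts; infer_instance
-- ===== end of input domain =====

-- B walks the list 24 ids at a time (index jump + slice of the batch tail) and folds each
-- batch into its nested where-clause; same output, simpler state than A's flag+counter loop.

-- the select_query literal shared by both Pythons
def pvSel : String := "\n    select id, DailyID, goods_count, pickerText, cardText\n    from Deals\n    where "

-- ===== PORT A =====
-- A's for-loop as structural recursion over the same state (result, where_ids, is_first, i);
-- the final `if i != 0` of A is the base case.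
def pvLoopA (deals result : List String) (where_ids : String) (is_first : Bool) (i : Int) : List String :=
  match deals with
  | [] => if i != 0 then result ++ [pvSel ++ where_ids ++ "\nlimit 200"] else result
  | d :: rest =>
    let i := i + 1
    let w1 := if !is_first then "(" ++ where_ids ++ " or " else where_ids
    let w2 := w1 ++ ("(id=" ++ d ++ ")")
    let w3 := if is_first then w2 else w2 ++ ")"
    let isf := if is_first then false else is_first
    if i == 24 then pvLoopA rest (result ++ [pvSel ++ w3 ++ "\nlimit 200"]) "" true 0
    else pvLoopA rest result w3 isf i

def get_query_texts (deals : List String) : List String :=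
  pvLoopA deals [] "" true 0

-- ===== PORT B =====
-- Source B's inner for-loop over the batch tail, as structural recursion on that slice
def pvClause (acc : String) : List String → String
  | [] => acc
  | d :: ds => pvClause ("(" ++ acc ++ " or (id=" ++ d ++ ")" ++ ")") ds

-- Source B's while-loop; i starts at 0 and only grows by 24, so it is tracked as a Nat;
-- deals[i] is exact because the loop guard gives i < len(deals).
def pvLoopB (deals result : List String) (i : Nat) : List String :=
  if h : i < deals.length then
    pvLoopB deals
      (result ++ [pvSel ++
        pvClause ("(id=" ++ deals[i] ++ ")")
          (PySem.List.slice deals (some ((i : Int) + 1)) (some ((i : Int) + 24)))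
        ++ "\nlimit 200"])
      (i + 24)
  else result
  termination_by deals.length - i
  decreasing_by omega

def get_query_texts_alt (deals : List String) : List String :=
  pvLoopB deals [] 0

-- ===== PRECONDITION & SPEC =====
def Spec_get_query_texts (deals : List String) (out : List String) : Prop := out = get_query_texts_alt deals
instance (deals : List String) (out : List String) : Decidable (Spec_get_query_texts deals out) := by unfold Spec_get_query_texts; infer_instance

-- ===== CLAIM (what is proved, stated in full; the proofs are below) =====
def Claim_equal_get_query_texts : Prop := ∀ (deals : List String), Dom_get_query_texts deals → Spec_get_query_texts deals (get_query_texts deals)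

-- ===== LEMMAS AND PROOFS =====

-- proof-side middle form: the batched output, one chunk of 24 per recursion step
def pvChunkRec : List String → List String
  | [] => []
  | d :: t =>
    (pvSel ++ pvClause ("(id=" ++ d ++ ")") (t.take 23) ++ "\nlimit 200")
      :: pvChunkRec (t.drop 23)
  termination_by deals => deals.length
  decreasing_by simp

theorem pvChunkRec_nil : pvChunkRec [] = [] := by
  rw [pvChunkRec]

theorem pvChunkRec_cons (d : String) (t : List String) :
    pvChunkRec (d :: t)
      = (pvSel ++ pvClause ("(id=" ++ d ++ ")") (t.take 23) ++ "\nlimit 200")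
          :: pvChunkRec (t.drop 23) := by
  rw [pvChunkRec]

-- string bookkeeping: A's step and B's fold step build the same string
theorem pvStep_eq (acc d : String) :
    (("(" ++ acc ++ " or ") ++ ("(id=" ++ d ++ ")")) ++ ")"
      = "(" ++ acc ++ " or (id=" ++ d ++ ")" ++ ")" := by
  have h : (" or " ++ "(id=" : String) = " or (id=" := by decide
  simp only [String.append_assoc, ← h]

-- A's loop invariant, by strong induction on the list length:
-- part 1: from a fresh state the loop produces result ++ the batched output;
-- part 2: mid-batch (j ids consumed, clause acc built), the loop finishes the current
--         batch from acc and continues batching the remainder.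
theorem pvLoopA_spec : ∀ (n : Nat) (ds : List String), ds.length ≤ n →
    (∀ res, pvLoopA ds res "" true 0 = res ++ pvChunkRec ds) ∧
    (∀ res acc (j : Nat), 1 ≤ j → j ≤ 23 →
      pvLoopA ds res acc false (j : Int)
        = res ++ (pvSel ++ pvClause acc (ds.take (24 - j)) ++ "\nlimit 200")
            :: pvChunkRec (ds.drop (24 - j))) := by
  intro n
  induction n with
  | zero =>
    intro ds hds
    have : ds = [] := by cases ds <;> simp_all
    subst this
    constructor
    · intro res; simp [pvLoopA, pvChunkRec_nil]
    · intro res acc j h1 _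
      have hj0 : ¬ ((j : Int) != 0) = false := by simp; omega
      simp [pvLoopA, pvClause, pvChunkRec_nil, hj0]
  | succ n ih =>
    intro ds hds
    constructor
    · intro res
      cases ds with
      | nil => simp [pvLoopA, pvChunkRec_nil]
      | cons d t =>
        have ht : t.length ≤ n := by simp at hds; omega
        have h2 := (ih t ht).2 res ("" ++ ("(id=" ++ d ++ ")")) 1 (by norm_num) (by norm_num)
        norm_num at h2
        simp only [pvLoopA]
        norm_num
        rw [h2, pvChunkRec_cons]
    · intro res acc j h1 h23
      cases ds with
      | nil =>
        have hj0 : ¬ ((j : Int) != 0) = false := by simp; omega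
        simp [pvLoopA, pvClause, pvChunkRec_nil, hj0]
      | cons d t =>
        have ht : t.length ≤ n := by simp at hds; omega
        have htake : (d :: t).take (24 - j) = d :: t.take (23 - j) := by
          have : 24 - j = (23 - j) + 1 := by omega
          simp [this]
        have hdrop : (d :: t).drop (24 - j) = t.drop (23 - j) := by
          have : 24 - j = (23 - j) + 1 := by omega
          simp [this]
        rw [htake, hdrop]
        by_cases hj : j = 23
        · subst hj
          have h1' := (ih t ht).1 (res ++ [pvSel ++ ((("(" ++ acc ++ " or ") ++ ("(id=" ++ d ++ ")")) ++ ")") ++ "\nlimit 200"])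
          simp only [pvLoopA]
          norm_num
          rw [h1']
          simp [pvClause, pvStep_eq]
        · have h2 := (ih t ht).2 res ((("(" ++ acc ++ " or ") ++ ("(id=" ++ d ++ ")")) ++ ")")
            (j + 1) (by omega) (by omega)
          have hcast : ((j : Int) + 1) = ((j + 1 : Nat) : Int) := by push_cast; ring
          have h24 : ¬ ((j : Int) + 1 == 24) = true := by
            simp; omega
          simp only [pvLoopA]
          norm_num [h24]
          rw [hcast, h2]
          have : 24 - (j + 1) = 23 - j := by omega
          rw [this]
          simp [pvClause, pvStep_eq]

-- B's loop invariant: from index i, the while-loop appends the batches of the suffix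
theorem pvLoopB_spec : ∀ (fuel : Nat) (deals res : List String) (i : Nat),
    deals.length ≤ i + fuel →
    pvLoopB deals res i = res ++ pvChunkRec (deals.drop i) := by
  intro fuel
  induction fuel with
  | zero =>
    intro deals res i hle
    rw [pvLoopB]
    have h : ¬ i < deals.length := by omega
    have hdrop : deals.drop i = [] := List.drop_of_length_le (by omega)
    simp [h, hdrop, pvChunkRec_nil]
  | succ fuel ih =>
    intro deals res i hle
    rw [pvLoopB]
    by_cases h : i < deals.length
    · have hdrop : deals.drop i = deals[i] :: deals.drop (i + 1) :=
        List.drop_eq_getElem_cons h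
      have hslice : PySem.List.slice deals (some ((i : Int) + 1)) (some ((i : Int) + 24))
          = (deals.drop (i + 1)).take 23 := by
        have e1 : ((i : Int) + 1) = ((i + 1 : Nat) : Int) := by push_cast; ring
        have e2 : ((i : Int) + 24) = ((i + 24 : Nat) : Int) := by push_cast; ring
        rw [e1, e2, PySem.List.slice_natCast]
        congr 1
        omega
      have hdd : (deals.drop (i + 1)).drop 23 = deals.drop (i + 24) := by
        rw [List.drop_drop]
      rw [dif_pos h, ih deals _ (i + 24) (by omega), hdrop, pvChunkRec_cons, hslice, hdd]
      simp
    · have hdrop : deals.drop i = [] := List.drop_of_length_le (by omega)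
      simp [h, hdrop, pvChunkRec_nil]

-- ===== VERDICT (by name: the statement is the Claim_ definition above) =====
theorem get_query_texts_spec : Claim_equal_get_query_texts := by
  intro deals _
  unfold Spec_get_query_texts get_query_texts get_query_texts_alt
  rw [pvLoopB_spec deals.length deals [] 0 (by omega)]
  simpa using ((pvLoopA_spec deals.length deals le_rfl).1 [])
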